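-- pv_equiv track=rewrite | github.com/mkolod/mxnet_seq2seq | seq2seq/seq2seq_iterator.py | gen_buckets
-- ===== SOURCE A (Python) =====
-- from collections import namedtuple, Counter
-- import operator
--
-- def gen_buckets(src_sent, targ_sent, filter_smaller_counts_than=None, max_sent_len=60, min_sent_len=1):
--     length_pairs = map(lambda x: (len(x[0]), len(x[1])), zip(src_sent, targ_sent))
--     counts = list(Counter(length_pairs).items())
--     c_sorted = sorted(counts, key=operator.itemgetter(0, 1))
--     buckets = [i[0] for i in c_sorted if i[1] >= filter_smaller_counts_than and
--                (max_sent_len is None or i[0][0] <= max_sent_len) and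
--                (max_sent_len is None or i[0][1] <= max_sent_len) and
--                (min_sent_len is None or i[0][0] >= min_sent_len) and
--                (min_sent_len is None or i[0][1] >= min_sent_len)]
--     return buckets
-- ===== SOURCE B (Python) =====
-- def gen_buckets(src_sent, targ_sent, filter_smaller_counts_than=None, max_sent_len=60, min_sent_len=1):
--     pairs = sorted((len(s), len(t)) for s, t in zip(src_sent, targ_sent))
--     buckets = []
--     i, n = 0, len(pairs)
--     while i < n:
--         j = i
--         while j < n and pairs[j] == pairs[i]:
--             j += 1
--         pair, count = pairs[i], j - i
--         if (count >= filter_smaller_counts_than and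
--                 (max_sent_len is None or pair[0] <= max_sent_len) and
--                 (max_sent_len is None or pair[1] <= max_sent_len) and
--                 (min_sent_len is None or pair[0] >= min_sent_len) and
--                 (min_sent_len is None or pair[1] >= min_sent_len)):
--             buckets.append(pair)
--         i = j
--     return buckets
-- ===== Notes on version B (the rewrite author's own statement) =====
-- stated objective: idiomatic
-- what changed: B replaces the Counter-then-sort-unique-pairs pipeline by sorting the full list of length pairs once and scanning it run by run (sort-then-groupby), emitting each run's head pair when its run length passes the same filter chain.
import Mathlib
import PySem

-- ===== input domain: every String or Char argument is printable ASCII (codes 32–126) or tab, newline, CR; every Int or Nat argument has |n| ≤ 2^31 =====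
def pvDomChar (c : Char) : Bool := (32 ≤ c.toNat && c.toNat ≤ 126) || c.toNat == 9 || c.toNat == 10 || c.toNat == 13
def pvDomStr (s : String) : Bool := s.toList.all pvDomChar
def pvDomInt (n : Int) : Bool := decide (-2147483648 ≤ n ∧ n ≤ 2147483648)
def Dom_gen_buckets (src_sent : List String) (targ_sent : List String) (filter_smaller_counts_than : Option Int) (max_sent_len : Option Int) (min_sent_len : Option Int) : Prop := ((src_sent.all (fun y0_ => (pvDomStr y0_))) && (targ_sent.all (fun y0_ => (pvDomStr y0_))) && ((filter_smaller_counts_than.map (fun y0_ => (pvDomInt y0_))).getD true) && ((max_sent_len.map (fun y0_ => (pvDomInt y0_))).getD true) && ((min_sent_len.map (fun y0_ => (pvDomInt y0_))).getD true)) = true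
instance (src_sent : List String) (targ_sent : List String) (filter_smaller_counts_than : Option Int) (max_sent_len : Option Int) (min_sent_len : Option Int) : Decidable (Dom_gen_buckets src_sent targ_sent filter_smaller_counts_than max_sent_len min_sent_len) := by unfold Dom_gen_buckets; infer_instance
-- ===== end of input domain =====

-- B sorts the full list of (len src, len targ) pairs once and scans it run by run (sort-then-group),
-- instead of A's Counter followed by sorting the unique (pair, count) items — same output, more idiomatic.
-- Equality of RETURN values is proved; neither version mutates its arguments.

-- `count >= None` (TypeError in Python when filter_smaller_counts_than is None and an item exists):
-- ported as `false`; Pre_ keeps every input that reaches this comparison out of the claim.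
def pyGeOpt (c : Int) (f : Option Int) : Bool :=
  match f with
  | some v => decide (c ≥ v)
  | none => false

-- the shared condition chain of the list comprehension (identical text in A and B)
def keepCond (f mx mn : Option Int) (p : Int × Int) (c : Int) : Bool :=
  pyGeOpt c f
    && (match mx with | none => true | some m => decide (p.1 ≤ m))
    && (match mx with | none => true | some m => decide (p.2 ≤ m))
    && (match mn with | none => true | some m => decide (p.1 ≥ m))
    && (match mn with | none => true | some m => decide (p.2 ≥ m))

-- ===== PORT A =====
def gen_buckets (src_sent : List String) (targ_sent : List String) (filter_smaller_counts_than : Option Int) (max_sent_len : Option Int) (min_sent_len : Option Int) : List (Int × Int) :=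
  let length_pairs := (src_sent.zip targ_sent).map (fun x => (PySem.Str.len x.1, PySem.Str.len x.2))
  let counts := (PySem.Dict.counter length_pairs).items
  let c_sorted := PySem.List.sorted counts (fun i => toLex (toLex i.1, i.2))
  (c_sorted.filter (fun i => keepCond filter_smaller_counts_than max_sent_len min_sent_len i.1 i.2)).map (fun i => i.1)

-- ===== PORT B =====
-- inner while loop of Source B: how far j advances past i while pairs[j] == pairs[i]
def runLen (p : Int × Int) : List (Int × Int) → Nat
  | [] => 0
  | q :: qs => if q = p then runLen p qs + 1 else 0

-- outer while loop of Source B: emit the head of each run iff its length passes the filter chain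
def scanRuns (f mx mn : Option Int) (pairs : List (Int × Int)) : List (Int × Int) :=
  match pairs with
  | [] => []
  | p :: rest =>
      (if keepCond f mx mn p ((runLen p rest : Int) + 1) then [p] else [])
        ++ scanRuns f mx mn (rest.drop (runLen p rest))
termination_by pairs.length
decreasing_by simp only [List.length_drop, List.length_cons]; omega

def gen_buckets_alt (src_sent : List String) (targ_sent : List String) (filter_smaller_counts_than : Option Int) (max_sent_len : Option Int) (min_sent_len : Option Int) : List (Int × Int) :=
  let pairs := PySem.List.sorted ((src_sent.zip targ_sent).map (fun x => (PySem.Str.len x.1, PySem.Str.len x.2))) (fun p => toLex p)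
  scanRuns filter_smaller_counts_than max_sent_len min_sent_len pairs

-- ===== PRECONDITION & SPEC =====
-- Pre_ excludes exactly the inputs where A raises TypeError (`count >= None`): filter_smaller_counts_than
-- is None while the zipped input is nonempty; B raises the same TypeError there.
def Pre_gen_buckets (src_sent : List String) (targ_sent : List String) (filter_smaller_counts_than : Option Int) (max_sent_len : Option Int) (min_sent_len : Option Int) : Prop :=
  filter_smaller_counts_than ≠ none ∨ src_sent = [] ∨ targ_sent = []
instance (src_sent : List String) (targ_sent : List String) (filter_smaller_counts_than : Option Int) (max_sent_len : Option Int) (min_sent_len : Option Int) : Decidable (Pre_gen_buckets src_sent targ_sent filter_smaller_counts_than max_sent_len min_sent_len) := by unfold Pre_gen_buckets; infer_instance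

def pvWitness_gen_buckets : List String × List String × Option Int × Option Int × Option Int :=
  (["ab", "x"], ["xyz", "q"], some 1, some 60, some 1)

def Spec_gen_buckets (src_sent : List String) (targ_sent : List String) (filter_smaller_counts_than : Option Int) (max_sent_len : Option Int) (min_sent_len : Option Int) (out : List (Int × Int)) : Prop := out = gen_buckets_alt src_sent targ_sent filter_smaller_counts_than max_sent_len min_sent_len
instance (src_sent : List String) (targ_sent : List String) (filter_smaller_counts_than : Option Int) (max_sent_len : Option Int) (min_sent_len : Option Int) (out : List (Int × Int)) : Decidable (Spec_gen_buckets src_sent targ_sent filter_smaller_counts_than max_sent_len min_sent_len out) := by unfold Spec_gen_buckets; infer_instance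

-- ===== CLAIM (what is proved, stated in full; the proofs are below) =====
def Claim_equal_gen_buckets : Prop := ∀ (src_sent : List String) (targ_sent : List String) (filter_smaller_counts_than : Option Int) (max_sent_len : Option Int) (min_sent_len : Option Int), Dom_gen_buckets src_sent targ_sent filter_smaller_counts_than max_sent_len min_sent_len → Pre_gen_buckets src_sent targ_sent filter_smaller_counts_than max_sent_len min_sent_len → Spec_gen_buckets src_sent targ_sent filter_smaller_counts_than max_sent_len min_sent_len (gen_buckets src_sent targ_sent filter_smaller_counts_than max_sent_len min_sent_len)

-- ===== LEMMAS AND PROOFS =====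

-- run-length encoding along scanRuns' recursion (proof-only helper)
def rle : List (Int × Int) → List ((Int × Int) × Int)
  | [] => []
  | p :: rest => (p, (runLen p rest : Int) + 1) :: rle (rest.drop (runLen p rest))
termination_by l => l.length
decreasing_by simp only [List.length_drop, List.length_cons]; omega

lemma scanRuns_eq_rle (f mx mn : Option Int) (l : List (Int × Int)) :
    scanRuns f mx mn l = (rle l |>.filter (fun i => keepCond f mx mn i.1 i.2)).map (fun i => i.1) := by
  induction l using rle.induct with
  | case1 => simp [scanRuns, rle]
  | case2 p rest ih =>
      rw [scanRuns, rle]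
      by_cases h : keepCond f mx mn p ((runLen p rest : Int) + 1)
      · simp [h, ih]
      · simp [h, ih]

lemma take_runLen (p : Int × Int) (l : List (Int × Int)) :
    l.take (runLen p l) = List.replicate (runLen p l) p := by
  induction l with
  | nil => simp [runLen]
  | cons q qs ih =>
      by_cases h : q = p
      · simp [runLen, h, List.replicate_succ, ih]
      · simp [runLen, h]

lemma drop_runLen_head (p : Int × Int) (l : List (Int × Int)) :
    l.drop (runLen p l) = [] ∨ ∃ q t, l.drop (runLen p l) = q :: t ∧ q ≠ p := by
  induction l with
  | nil => simp
  | cons q qs ih =>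
      by_cases h : q = p
      · simpa [runLen, h] using ih
      · exact Or.inr ⟨q, qs, by simp [runLen, h], h⟩

lemma lt_of_mem_drop (p : Int × Int) (rest : List (Int × Int))
    (hpw : List.Pairwise (fun a b : Int × Int => toLex a ≤ toLex b) (p :: rest)) :
    ∀ x ∈ rest.drop (runLen p rest), toLex p < toLex x := by
  intro x hx
  have hrest := (List.pairwise_cons.mp hpw).2
  have hpw' : List.Pairwise (fun a b : Int × Int => toLex a ≤ toLex b) (rest.drop (runLen p rest)) :=
    List.Pairwise.sublist (List.drop_sublist _ _) hrest
  rcases drop_runLen_head p rest with h | ⟨q, t, heq, hqp⟩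
  · rw [h] at hx; cases hx
  · have hqmem : q ∈ rest := (List.drop_sublist _ _).mem (heq ▸ List.mem_cons_self ..)
    have hpq : toLex p < toLex q :=
      lt_of_le_of_ne ((List.pairwise_cons.mp hpw).1 q hqmem)
        (fun h => hqp (by simpa using h.symm))
    rw [heq] at hx hpw'
    rcases List.mem_cons.mp hx with rfl | hx'
    · exact hpq
    · exact lt_of_lt_of_le hpq ((List.pairwise_cons.mp hpw').1 x hx')

lemma count_cons_sorted (p : Int × Int) (rest : List (Int × Int)) (x : Int × Int)
    (hpw : List.Pairwise (fun a b : Int × Int => toLex a ≤ toLex b) (p :: rest)) :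
    (p :: rest).count x =
      (if x = p then runLen p rest + 1 else (rest.drop (runLen p rest)).count x) := by
  have hcr : rest.count x = (List.replicate (runLen p rest) p ++ rest.drop (runLen p rest)).count x := by
    conv_lhs => rw [← List.take_append_drop (runLen p rest) rest, take_runLen]
  rw [List.count_cons, hcr, List.count_append, List.count_replicate]
  by_cases hx : x = p
  · subst hx
    have h0 : (rest.drop (runLen x rest)).count x = 0 := by
      rw [List.count_eq_zero]
      intro hmem
      exact absurd (lt_of_mem_drop x rest hpw x hmem) (lt_irrefl _)
    simp [h0]
  · have hb : (p == x) = false := beq_eq_false_iff_ne.mpr (Ne.symm hx)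
    simp [hx, hb]

lemma mem_cons_sorted (p : Int × Int) (rest : List (Int × Int)) (x : Int × Int) :
    (x ∈ p :: rest) ↔ (x = p ∨ x ∈ rest.drop (runLen p rest)) := by
  constructor
  · intro hx
    rcases List.mem_cons.mp hx with rfl | hx'
    · exact Or.inl rfl
    · conv at hx' => rw [← List.take_append_drop (runLen p rest) rest]
      rcases List.mem_append.mp hx' with h | h
      · rw [take_runLen] at h
        exact Or.inl (List.eq_of_mem_replicate h)
      · exact Or.inr h
  · rintro (rfl | hx')
    · exact List.mem_cons_self ..
    · exact List.mem_cons.mpr (Or.inr ((List.drop_sublist _ _).mem hx'))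

lemma mem_rle (l : List (Int × Int))
    (hpw : List.Pairwise (fun a b : Int × Int => toLex a ≤ toLex b) l) :
    ∀ pc : (Int × Int) × Int, pc ∈ rle l ↔ pc.1 ∈ l ∧ pc.2 = (l.count pc.1 : Int) := by
  induction l using rle.induct with
  | case1 => simp [rle]
  | case2 p rest ih =>
      intro pc
      have hpw' : List.Pairwise (fun a b : Int × Int => toLex a ≤ toLex b)
          (rest.drop (runLen p rest)) :=
        List.Pairwise.sublist (List.drop_sublist _ _) (List.pairwise_cons.mp hpw).2
      rw [rle, List.mem_cons, ih hpw' pc, mem_cons_sorted, count_cons_sorted p rest pc.1 hpw]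
      by_cases hx : pc.1 = p
      · have h0 : pc.1 ∉ rest.drop (runLen p rest) := fun hmem =>
          absurd (lt_of_mem_drop p rest hpw pc.1 hmem) (by simp [hx])
        constructor
        · rintro (rfl | ⟨hm, _⟩)
          · simp
          · exact absurd hm h0
        · rintro ⟨_, hc⟩
          left
          have : pc.2 = (runLen p rest : Int) + 1 := by rw [hc]; simp [hx]
          calc pc = (pc.1, pc.2) := rfl
            _ = (p, (runLen p rest : Int) + 1) := by rw [hx, this]
      · simp only [hx, if_false]
        constructor
        · rintro (rfl | ⟨hm, hc⟩)
          · exact absurd rfl hx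
          · exact ⟨Or.inr hm, hc⟩
        · rintro ⟨hm | hm, hc⟩
          · exact hm.elim
          · exact Or.inr ⟨hm, hc⟩

lemma fst_mem_rle (l : List (Int × Int)) :
    ∀ pc : (Int × Int) × Int, pc ∈ rle l → pc.1 ∈ l := by
  induction l using rle.induct with
  | case1 => simp [rle]
  | case2 p rest ih =>
      intro pc hpc
      rw [rle, List.mem_cons] at hpc
      rcases hpc with rfl | h
      · exact List.mem_cons_self ..
      · exact List.mem_cons.mpr (Or.inr ((List.drop_sublist _ _).mem (ih pc h)))

lemma pairwise_rle (l : List (Int × Int))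
    (hpw : List.Pairwise (fun a b : Int × Int => toLex a ≤ toLex b) l) :
    List.Pairwise (fun a b : (Int × Int) × Int => toLex a.1 < toLex b.1) (rle l) := by
  induction l using rle.induct with
  | case1 => simp [rle]
  | case2 p rest ih =>
      have hpw' : List.Pairwise (fun a b : Int × Int => toLex a ≤ toLex b)
          (rest.drop (runLen p rest)) :=
        List.Pairwise.sublist (List.drop_sublist _ _) (List.pairwise_cons.mp hpw).2
      rw [rle]
      refine List.pairwise_cons.mpr ⟨?_, ih hpw'⟩
      intro b hb
      exact lt_of_mem_drop p rest hpw b.1 (fst_mem_rle _ b hb)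

lemma rle_sorted_eq (lp : List (Int × Int)) :
    PySem.List.sorted ((PySem.Dict.counter lp).items) (fun i => toLex (toLex i.1, i.2))
      = rle (PySem.List.sorted lp (fun p => toLex p)) := by
  have hpw : List.Pairwise
      (fun a b : Int × Int => toLex a ≤ toLex b) (PySem.List.sorted lp (fun p => toLex p)) :=
    PySem.List.sorted_pairwise lp _
  have hperm : (PySem.List.sorted lp (fun p => toLex p)).Perm lp :=
    PySem.List.sorted_perm lp _ false
  apply PySem.List.sorted_eq_of_perm_of_pairwise_lt
  · rw [PySem.Dict.items_counter]
    have h1 : (rle (PySem.List.sorted lp (fun p => toLex p))).Nodup :=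
      (pairwise_rle _ hpw).imp (fun h => by rintro rfl; exact lt_irrefl _ h)
    have h2 : (List.map (fun k => (k, (List.count k lp : Int))) (PySem.Set.ofList lp)).Nodup :=
      (PySem.Set.nodup_ofList lp).map (fun a b h => congrArg Prod.fst h)
    rw [List.perm_ext_iff_of_nodup h1 h2]
    intro pc
    rw [mem_rle _ hpw pc, hperm.mem_iff, hperm.count_eq]
    simp only [List.mem_map, PySem.Set.mem_ofList]
    constructor
    · rintro ⟨hm, hc⟩
      exact ⟨pc.1, hm, by rw [← hc]⟩
    · rintro ⟨k, hk, hkeq⟩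
      have h1 : pc.1 = k := by rw [← hkeq]
      have h2 : pc.2 = (List.count k lp : Int) := by rw [← hkeq]
      exact ⟨h1 ▸ hk, by rw [h2, h1]⟩
  · exact (pairwise_rle _ hpw).imp
      (fun h => Prod.Lex.toLex_lt_toLex.mpr (Or.inl h))

lemma main_eq (src targ : List String) (f mx mn : Option Int) :
    gen_buckets src targ f mx mn = gen_buckets_alt src targ f mx mn := by
  show List.map _ (List.filter _ (PySem.List.sorted _ _)) = scanRuns _ _ _ _
  rw [rle_sorted_eq, scanRuns_eq_rle]

-- ===== VERDICT (by name: the statement is the Claim_ definition above) =====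
theorem gen_buckets_spec : Claim_equal_gen_buckets := by
  intro src targ f mx mn _ _
  unfold Spec_gen_buckets
  exact main_eq src targ f mx mn
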